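-- pv_equiv track=rewrite | github.com/Wewds1/python-daily | python_challenge/10-7-2025.py | find_landing_spot
-- ===== SOURCE A (Python) =====
-- def find_landing_spot(matrix):
--     rows = len(matrix)
--     cols = len(matrix[0])
--
--     safest_spot = None
--     lowest_danger = float('inf')
--
--     for i in range(rows):
--         for j in range(cols):
--             if matrix[i][j] == 0:
--                 latest_danger = 0
--
--                 closest = [
--                     (i - 1, j),
--                     (i + 1, j),
--                     (i, j - 1),
--                     (i, j + 1 )]
--
--                 for close_row, close_col in closest:
--                     if 0 <= close_row < rows and 0 <= close_col < cols:
--                         latest_danger += matrix[close_row][close_col]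
--
--                 if latest_danger < lowest_danger:
--                     lowest_danger = latest_danger
--                     safest_spot = i, j
--     return list(safest_spot)
-- ===== SOURCE B (Python) =====
-- def find_landing_spot(matrix):
--     rows = len(matrix)
--     cols = len(matrix[0])
--
--     # Scatter pass: push each cell's value outward onto its in-bounds neighbors.
--     danger = {}
--     for i in range(rows):
--         for j in range(cols):
--             v = matrix[i][j]
--             for r, c in ((i - 1, j), (i + 1, j), (i, j - 1), (i, j + 1)):
--                 if 0 <= r < rows and 0 <= c < cols:
--                     danger[(r, c)] = danger.get((r, c), 0) + v
--
--     # Minimizing pass over zero cells in row-major order (strict '<' keeps first tie).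
--     spot = None
--     best = None
--     for i in range(rows):
--         for j in range(cols):
--             if matrix[i][j] == 0 and (best is None or danger.get((i, j), 0) < best):
--                 best = danger.get((i, j), 0)
--                 spot = (i, j)
--     return list(spot)
-- ===== Notes on version B (the rewrite author's own statement) =====
-- stated objective: alternative
-- what changed: Replaces A's per-zero-cell gather of the four neighbor values with a scatter pass that builds a danger table (dict) for the whole grid once, followed by a separate row-major minimizing scan over the zero cells.
import Mathlib
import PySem

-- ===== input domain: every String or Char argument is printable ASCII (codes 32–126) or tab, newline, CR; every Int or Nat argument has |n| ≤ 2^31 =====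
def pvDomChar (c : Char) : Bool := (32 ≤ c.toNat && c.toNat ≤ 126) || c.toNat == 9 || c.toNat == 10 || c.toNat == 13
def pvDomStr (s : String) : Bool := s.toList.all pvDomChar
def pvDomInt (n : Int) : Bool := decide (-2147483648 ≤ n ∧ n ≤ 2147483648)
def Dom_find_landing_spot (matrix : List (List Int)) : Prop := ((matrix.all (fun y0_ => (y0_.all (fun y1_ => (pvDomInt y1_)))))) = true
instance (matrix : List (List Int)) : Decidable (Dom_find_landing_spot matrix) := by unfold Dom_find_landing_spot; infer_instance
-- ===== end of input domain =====

-- B replaces A's per-zero-cell gather of the four neighbor sums by a scatter pass that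
-- builds a danger table for the whole grid, followed by a separate row-major minimizing
-- scan (objective: alternative decomposition, same asymptotic cost).

-- ===== PORT A =====
-- matrix[i][j] for indices the loops keep in range (0 ≤ i < rows, 0 ≤ j ≤ row length)
def pvGet (m : List (List Int)) (i j : Int) : Int := (m.getD i.toNat []).getD j.toNat 0

-- the list 'closest' of A (also the neighbor tuple of B)
def pvNbrs (p : Int × Int) : List (Int × Int) :=
  [(p.1 - 1, p.2), (p.1 + 1, p.2), (p.1, p.2 - 1), (p.1, p.2 + 1)]

-- '0 <= close_row < rows and 0 <= close_col < cols'
def pvInB (rows cols : Int) (p : Int × Int) : Bool :=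
  decide (0 ≤ p.1 ∧ p.1 < rows ∧ 0 ≤ p.2 ∧ p.2 < cols)

def find_landing_spot (matrix : List (List Int)) : List Int :=
  let rows : Int := matrix.length
  let cols : Int := (matrix.headD []).length
  -- state = (safest_spot, lowest_danger); none = (None, float('inf'))
  let st := (PySem.List.pyRange 0 rows 1).foldl (fun st i =>
      (PySem.List.pyRange 0 cols 1).foldl (fun st j =>
        if pvGet matrix i j == 0 then
          let d := (pvNbrs (i, j)).foldl
            (fun acc p => if pvInB rows cols p then acc + pvGet matrix p.1 p.2 else acc) 0
          if (match st.2 with | none => true | some l => decide (d < l)) then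
            ((some (i, j), some d) : Option (Int × Int) × Option Int)
          else st
        else st) st)
    ((none, none) : Option (Int × Int) × Option Int)
  match st.1 with
  | some p => [p.1, p.2]
  | none => []   -- list(None): A raises TypeError here; excluded by Pre_

-- ===== PORT B =====
def find_landing_spot_alt (matrix : List (List Int)) : List Int :=
  let rows : Int := matrix.length
  let cols : Int := (matrix.headD []).length
  -- scatter pass: danger[(r,c)] = danger.get((r,c),0) + matrix[i][j]
  let danger := (PySem.List.pyRange 0 rows 1).foldl (fun d i =>
      (PySem.List.pyRange 0 cols 1).foldl (fun d j =>
        (pvNbrs (i, j)).foldl (fun d p =>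
          if pvInB rows cols p then d.insert p (d.getD p 0 + pvGet matrix i j) else d) d) d)
    (PySem.Dict.empty : PySem.Dict (Int × Int) Int)
  -- minimizing pass: state = (spot, best)
  let st := (PySem.List.pyRange 0 rows 1).foldl (fun st i =>
      (PySem.List.pyRange 0 cols 1).foldl (fun st j =>
        if pvGet matrix i j == 0 &&
            (match st.2 with | none => true | some b => decide (danger.getD (i, j) 0 < b)) then
          ((some (i, j), some (danger.getD (i, j) 0)) : Option (Int × Int) × Option Int)
        else st) st)
    ((none, none) : Option (Int × Int) × Option Int)
  match st.1 with
  | some p => [p.1, p.2]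
  | none => []   -- list(None): B raises TypeError here; excluded by Pre_

-- ===== PRECONDITION & SPEC =====
-- Pre_ excludes exactly the inputs on which A raises: the empty matrix (IndexError on
-- matrix[0]), a matrix with some row shorter than the first row (IndexError in the scan),
-- and a matrix with no zero cell in the scanned region (TypeError from list(None)).
def Pre_find_landing_spot (matrix : List (List Int)) : Prop :=
  matrix ≠ [] ∧
  (∀ row ∈ matrix, (matrix.headD []).length ≤ row.length) ∧
  (∃ i < matrix.length, ∃ j < (matrix.headD []).length, (matrix.getD i []).getD j 0 = 0)
instance (matrix : List (List Int)) : Decidable (Pre_find_landing_spot matrix) := by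
  unfold Pre_find_landing_spot; infer_instance

def pvWitness_find_landing_spot : List (List Int) := [[1, 0], [2, 3]]

def Spec_find_landing_spot (matrix : List (List Int)) (out : List Int) : Prop := out = find_landing_spot_alt matrix
instance (matrix : List (List Int)) (out : List Int) : Decidable (Spec_find_landing_spot matrix out) := by unfold Spec_find_landing_spot; infer_instance

-- ===== CLAIM (what is proved, stated in full; the proofs are below) =====
def Claim_equal_find_landing_spot : Prop := ∀ (matrix : List (List Int)), Dom_find_landing_spot matrix → Pre_find_landing_spot matrix → Spec_find_landing_spot matrix (find_landing_spot matrix)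

-- ===== LEMMAS AND PROOFS =====

-- row-major list of all in-bounds cells
def pvCells (R C : Int) : List (Int × Int) :=
  (PySem.List.pyRange 0 R 1).flatMap (fun i => (PySem.List.pyRange 0 C 1).map (fun j => (i, j)))

-- the neighbor sum A computes for one cell
def pvGather (m : List (List Int)) (R C : Int) (k : Int × Int) : Int :=
  (pvNbrs k).foldl (fun acc p => if pvInB R C p then acc + pvGet m p.1 p.2 else acc) 0

-- the value accumulated at key k by a list of (key, value) additive updates
def pvSumIf (k : Int × Int) : List ((Int × Int) × Int) → Int
  | [] => 0
  | kv :: t => (if kv.1 = k then kv.2 else 0) + pvSumIf k t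

lemma foldl_flatMap {α β σ : Type} (g : α → List β) (h : σ → β → σ) (L : List α) (s : σ) :
    L.foldl (fun s c => (g c).foldl h s) s = (L.flatMap g).foldl h s := by
  induction L generalizing s with
  | nil => rfl
  | cons a t ih => simp [List.foldl_append, ih]

lemma foldl_nested {σ : Type} (g : σ → Int → Int → σ) (L1 L2 : List Int) (s : σ) :
    L1.foldl (fun s i => L2.foldl (fun s j => g s i j) s) s
      = (L1.flatMap (fun i => L2.map (fun j => (i, j)))).foldl (fun s p => g s p.1 p.2) s := by
  induction L1 generalizing s with
  | nil => rfl
  | cons a t ih => simp [List.foldl_append, List.foldl_map, ih]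

lemma mem_pvCells {R C : Int} {p : Int × Int} :
    p ∈ pvCells R C ↔ 0 ≤ p.1 ∧ p.1 < R ∧ 0 ≤ p.2 ∧ p.2 < C := by
  obtain ⟨i, j⟩ := p
  simp [pvCells, List.mem_flatMap, PySem.List.mem_pyRange_one]
  aesop

lemma nodup_pvCells (R C : Int) : (pvCells R C).Nodup := by
  unfold pvCells
  rw [List.nodup_flatMap]
  constructor
  · intro i _
    exact (PySem.List.nodup_pyRange_one 0 C).map (fun a b h => by simpa [Prod.ext_iff] using h)
  · have hne : ∀ a ∈ PySem.List.pyRange 0 R 1, ∀ b ∈ PySem.List.pyRange 0 R 1, a ≠ b →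
        (Function.onFun List.Disjoint fun i => (PySem.List.pyRange 0 C 1).map (fun j => (i, j))) a b := by
      intro a _ b _ hab
      simp only [Function.onFun, List.Disjoint]
      intro x hx hy
      simp only [List.mem_map] at hx hy
      obtain ⟨u, _, rfl⟩ := hx
      obtain ⟨v, _, hv⟩ := hy
      exact hab (congrArg Prod.fst hv).symm
    exact (PySem.List.nodup_pyRange_one 0 R).pairwise_of_forall_ne (fun a ha b hb h => hne a ha b hb h)

lemma nodup_pvNbrs (p : Int × Int) : (pvNbrs p).Nodup := by
  simp [pvNbrs, Prod.ext_iff]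
  omega

lemma mem_pvNbrs_comm (p q : Int × Int) : p ∈ pvNbrs q ↔ q ∈ pvNbrs p := by
  simp [pvNbrs, Prod.ext_iff]
  omega

lemma pvSumIf_append (k : Int × Int) (u v : List ((Int × Int) × Int)) :
    pvSumIf k (u ++ v) = pvSumIf k u + pvSumIf k v := by
  induction u with
  | nil => simp [pvSumIf]
  | cons a t ih => simp [pvSumIf, ih]; ring

lemma getD_scatterfold (U : List ((Int × Int) × Int)) (d : PySem.Dict (Int × Int) Int)
    (k : Int × Int) :
    (U.foldl (fun d kv => d.insert kv.1 (d.getD kv.1 0 + kv.2)) d).getD k 0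
      = d.getD k 0 + pvSumIf k U := by
  induction U generalizing d with
  | nil => simp [pvSumIf]
  | cons kv t ih =>
    simp only [List.foldl_cons, ih, pvSumIf]
    by_cases h : kv.1 = k
    · subst h; rw [PySem.Dict.getD_insert_self]; simp; ring
    · rw [PySem.Dict.getD_insert_of_ne _ _ _ (fun hh => h hh.symm)]
      simp [h]

lemma pvSumIf_map_const (k : Int × Int) (P : List (Int × Int)) (hP : P.Nodup) (w : Int) :
    pvSumIf k (P.map (fun p => (p, w))) = if k ∈ P then w else 0 := by
  induction P with
  | nil => simp [pvSumIf]
  | cons a t ih =>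
    simp only [List.map_cons, pvSumIf]
    rcases List.nodup_cons.mp hP with ⟨ha, ht⟩
    by_cases h : a = k
    · subst h; simp [ih ht, ha]
    · simp [h, ih ht, Ne.symm h]

-- sum over L of (u at p, g elsewhere), L nodup
lemma sum_map_update {L : List (Int × Int)} (hL : L.Nodup) (p : Int × Int)
    (u g : Int × Int → Int) :
    (L.map (fun c => if c = p then u c else g c)).sum
      = (L.map g).sum + (if p ∈ L then u p - g p else 0) := by
  induction L with
  | nil => simp
  | cons a t ih =>
    rcases List.nodup_cons.mp hL with ⟨ha, ht⟩
    by_cases h : a = p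
    · subst h
      simp [ha, ih ht]
      ring
    · simp [h, ih ht, Ne.symm h]
      by_cases hp : p ∈ t <;> simp [hp] <;> ring

lemma sum_ind_swap (L P : List (Int × Int)) (hL : L.Nodup) (hP : P.Nodup)
    (w : Int × Int → Int) :
    (L.map (fun c => if c ∈ P then w c else 0)).sum
      = (P.map (fun q => if q ∈ L then w q else 0)).sum := by
  induction P with
  | nil => simp
  | cons p t ih =>
    rcases List.nodup_cons.mp hP with ⟨hp, ht⟩
    have step :
        (L.map (fun c => if c ∈ p :: t then w c else 0)).sum
          = (L.map (fun c => if c = p then w c else (if c ∈ t then w c else 0))).sum := by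
      congr 1
      apply List.map_congr_left
      intro c _
      by_cases h : c = p <;> simp [h, List.mem_cons]
    rw [step, sum_map_update hL p w (fun c => if c ∈ t then w c else 0), ih ht]
    simp [hp]
    by_cases hq : p ∈ L <;> simp [hq] <;> ring

lemma foldl_guard_add {β : Type} (q : β → Bool) (w : β → Int) (P : List β) (a : Int) :
    P.foldl (fun acc p => if q p then acc + w p else acc) a
      = a + (P.map (fun p => if q p then w p else 0)).sum := by
  induction P generalizing a with
  | nil => simp
  | cons b t ih =>
    simp only [List.foldl_cons, List.map_cons, List.sum_cons, ih]
    by_cases h : q b <;> simp [h] <;> ring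

-- the danger table of B, generic in the dimensions
def pvDanger (m : List (List Int)) (R C : Int) : PySem.Dict (Int × Int) Int :=
  (PySem.List.pyRange 0 R 1).foldl (fun d i =>
      (PySem.List.pyRange 0 C 1).foldl (fun d j =>
        (pvNbrs (i, j)).foldl (fun d p =>
          if pvInB R C p then d.insert p (d.getD p 0 + pvGet m i j) else d) d) d)
    (PySem.Dict.empty : PySem.Dict (Int × Int) Int)

lemma pvSumIf_flatMap {α : Type} (k : Int × Int) (g : α → List ((Int × Int) × Int))
    (L : List α) :
    pvSumIf k (L.flatMap g) = (L.map (fun c => pvSumIf k (g c))).sum := by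
  induction L with
  | nil => simp [pvSumIf]
  | cons a t ih => simp [pvSumIf_append, ih]

lemma danger_getD (m : List (List Int)) (R C : Int) (k : Int × Int)
    (hk : 0 ≤ k.1 ∧ k.1 < R ∧ 0 ≤ k.2 ∧ k.2 < C) :
    (pvDanger m R C).getD k 0 = pvGather m R C k := by
  have h1 : pvDanger m R C
      = (pvCells R C).foldl (fun d c =>
          (pvNbrs c).foldl (fun d p =>
            if pvInB R C p then d.insert p (d.getD p 0 + pvGet m c.1 c.2) else d) d)
        PySem.Dict.empty :=
    foldl_nested (fun (d : PySem.Dict (Int × Int) Int) (i j : Int) =>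
      (pvNbrs (i, j)).foldl (fun (d : PySem.Dict (Int × Int) Int) p =>
        if pvInB R C p then d.insert p (d.getD p 0 + pvGet m i j) else d) d) _ _ _
  have h2 : ∀ (d : PySem.Dict (Int × Int) Int) (c : Int × Int),
      (pvNbrs c).foldl (fun d p =>
          if pvInB R C p then d.insert p (d.getD p 0 + pvGet m c.1 c.2) else d) d
        = ((((pvNbrs c).filter (pvInB R C)).map (fun p => (p, pvGet m c.1 c.2))).foldl
            (fun d kv => d.insert kv.1 (d.getD kv.1 0 + kv.2)) d) := by
    intro d c
    rw [List.foldl_map, List.foldl_filter]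
  have h3 : pvDanger m R C
      = ((pvCells R C).flatMap (fun c =>
            ((pvNbrs c).filter (pvInB R C)).map (fun p => (p, pvGet m c.1 c.2)))).foldl
          (fun d kv => d.insert kv.1 (d.getD kv.1 0 + kv.2)) PySem.Dict.empty := by
    rw [h1]
    rw [show (fun (d : PySem.Dict (Int × Int) Int) (c : Int × Int) =>
          (pvNbrs c).foldl (fun d p =>
            if pvInB R C p then d.insert p (d.getD p 0 + pvGet m c.1 c.2) else d) d)
        = (fun d c => ((((pvNbrs c).filter (pvInB R C)).map (fun p => (p, pvGet m c.1 c.2))).foldl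
            (fun d kv => d.insert kv.1 (d.getD kv.1 0 + kv.2)) d)) from funext fun d => funext fun c => h2 d c]
    exact foldl_flatMap _ _ _ _
  rw [h3, getD_scatterfold, pvSumIf_flatMap]
  have hempty : (PySem.Dict.empty : PySem.Dict (Int × Int) Int).getD k 0 = 0 := rfl
  rw [hempty, zero_add]
  have h4 : ∀ c ∈ pvCells R C,
      pvSumIf k (((pvNbrs c).filter (pvInB R C)).map (fun p => (p, pvGet m c.1 c.2)))
        = (if c ∈ pvNbrs k then pvGet m c.1 c.2 else 0) := by
    intro c _
    rw [pvSumIf_map_const k _ ((nodup_pvNbrs c).filter _)]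
    congr 1
    simp only [List.mem_filter, eq_iff_iff]
    constructor
    · intro h
      exact (mem_pvNbrs_comm k c).mp h.1
    · intro h
      refine ⟨(mem_pvNbrs_comm k c).mpr h, ?_⟩
      simp [pvInB]
      omega
  rw [List.map_congr_left h4,
      sum_ind_swap _ _ (nodup_pvCells R C) (nodup_pvNbrs k) (fun c => pvGet m c.1 c.2)]
  have h5 : ∀ q ∈ pvNbrs k,
      (if q ∈ pvCells R C then pvGet m q.1 q.2 else 0)
        = (if pvInB R C q then pvGet m q.1 q.2 else 0) := by
    intro q _
    congr 1
    simp only [mem_pvCells, pvInB, decide_eq_true_eq]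
  rw [List.map_congr_left h5]
  unfold pvGather
  rw [foldl_guard_add (pvInB R C) (fun p => pvGet m p.1 p.2), zero_add]

lemma scan_eq (m : List (List Int)) (R C : Int) :
    ((PySem.List.pyRange 0 R 1).foldl (fun st i =>
      (PySem.List.pyRange 0 C 1).foldl (fun st j =>
        if pvGet m i j == 0 then
          let d := (pvNbrs (i, j)).foldl
            (fun acc p => if pvInB R C p then acc + pvGet m p.1 p.2 else acc) 0
          if (match st.2 with | none => true | some l => decide (d < l)) then
            ((some (i, j), some d) : Option (Int × Int) × Option Int)
          else st
        else st) st)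
      ((none, none) : Option (Int × Int) × Option Int))
    = ((PySem.List.pyRange 0 R 1).foldl (fun st i =>
      (PySem.List.pyRange 0 C 1).foldl (fun st j =>
        if pvGet m i j == 0 &&
            (match st.2 with | none => true | some b => decide ((pvDanger m R C).getD (i, j) 0 < b)) then
          ((some (i, j), some ((pvDanger m R C).getD (i, j) 0)) : Option (Int × Int) × Option Int)
        else st) st)
      ((none, none) : Option (Int × Int) × Option Int)) := by
  refine Eq.trans (foldl_nested _ _ _ _) (Eq.trans ?_ (foldl_nested _ _ _ _).symm)
  apply PySem.List.foldl_congr_mem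
  intro acc c hc
  have hk := mem_pvCells.mp hc
  show (if pvGet m c.1 c.2 == 0 then
          if (match acc.2 with | none => true | some l => decide (pvGather m R C (c.1, c.2) < l)) then
            ((some (c.1, c.2), some (pvGather m R C (c.1, c.2))) : Option (Int × Int) × Option Int)
          else acc
        else acc)
      = (if pvGet m c.1 c.2 == 0 &&
            (match acc.2 with | none => true | some b => decide ((pvDanger m R C).getD (c.1, c.2) 0 < b)) then
          (some (c.1, c.2), some ((pvDanger m R C).getD (c.1, c.2) 0))
        else acc)
  rw [danger_getD m R C (c.1, c.2) (by simpa using hk)]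
  by_cases h0 : pvGet m c.1 c.2 == 0 <;>
    cases hacc : acc.2 <;>
    simp [h0]

theorem find_landing_spot_main (m : List (List Int)) :
    find_landing_spot m = find_landing_spot_alt m := by
  exact congrArg
    (fun st : Option (Int × Int) × Option Int =>
      match st.1 with
      | some p => [p.1, p.2]
      | none => ([] : List Int))
    (scan_eq m (m.length : Int) ((m.headD []).length : Int))

-- ===== VERDICT (by name: the statement is the Claim_ definition above) =====
theorem find_landing_spot_spec : Claim_equal_find_landing_spot := by
  intro m _ _
  show find_landing_spot m = find_landing_spot_alt m
  exact find_landing_spot_main m
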